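-- pv_equiv track=rewrite | github.com/brandonhippe/Advent-of-Code | 2015/python/2015_20.py | part1
-- ===== SOURCE A (Python) =====
-- def part1(data):
--     """ 2015 Day 20 Part 1
--     """
--
--     num = int(data[0])
--     houses = [0] * (1 + num // 10)
--     for elf in range(1, num // 10 + 1):
--         for i in range(elf, num // 10 + 1, elf):
--             houses[i] += 10 * elf
--
--     for i, h in enumerate(houses):
--         if h >= num:
--             break
--
--     return i
-- ===== SOURCE B (Python) =====
-- def part1(data):
--     """ 2015 Day 20 Part 1 """
--     num = int(data[0])
--     last = num // 10
--     for i in range(last + 1):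
--         s = 0
--         for d in range(1, i + 1):
--             if i % d == 0:
--                 s += d
--         if 10 * s >= num:
--             return i
--     return last
-- ===== Notes on version B (the rewrite author's own statement) =====
-- stated objective: alternative
-- what changed: Replaces A's elf sieve over a shared O(num/10) houses array (then a separate scan) by a single scan that computes each house's present count directly via a per-house divisor sum by trial division, returning at the first qualifying house.
import Mathlib
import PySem

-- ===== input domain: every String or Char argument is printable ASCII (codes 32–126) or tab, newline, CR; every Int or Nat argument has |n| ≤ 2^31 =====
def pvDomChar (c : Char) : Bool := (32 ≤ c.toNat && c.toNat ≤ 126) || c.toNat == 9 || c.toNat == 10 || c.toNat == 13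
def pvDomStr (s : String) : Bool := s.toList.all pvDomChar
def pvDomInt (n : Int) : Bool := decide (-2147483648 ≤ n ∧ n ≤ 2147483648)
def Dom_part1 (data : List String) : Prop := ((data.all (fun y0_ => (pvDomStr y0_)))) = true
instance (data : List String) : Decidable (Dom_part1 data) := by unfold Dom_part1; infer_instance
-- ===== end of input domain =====

-- B replaces A's elf sieve over an O(num/10) array by a direct per-house divisor-sum
-- scan (trial division), returning at the first qualifying house; alternative algorithm, not faster.

-- ===== PORT A =====
-- inner loop: for i in range(elf, num//10 + 1, elf): houses[i] += 10*elf
def part1SieveInner (num elf : Int) (houses : List Int) : List Int :=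
  (PySem.List.pyRange elf (PySem.Int.floordiv num 10 + 1) elf).foldl
    (fun h i => PySem.List.pySetD h i (PySem.List.pyGetD h i 0 + 10 * elf)) houses

-- for i, h in enumerate(houses): if h >= num: break  ... return i
-- (the accumulator is the current value of the loop variable i; used when the loop ends without break)
def part1Find (num : Int) : List (Int × Int) → Int → Int
  | [], i => i
  | (i, h) :: rest, _ => if h ≥ num then i else part1Find num rest i

def part1 (data : List String) : Int :=
  match PySem.List.pyGet? data 0 with
  | none => 0       -- IndexError in Python; excluded by Pre_part1
  | some s =>
    match PySem.Int.ofStr? s with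
    | none => 0     -- ValueError in Python; excluded by Pre_part1
    | some num =>
      let houses : List Int := List.replicate (1 + PySem.Int.floordiv num 10).toNat 0
      let houses := (PySem.List.pyRange 1 (PySem.Int.floordiv num 10 + 1) 1).foldl
        (fun h elf => part1SieveInner num elf h) houses
      -- on empty houses Python raises NameError (i unbound); excluded by Pre_part1
      part1Find num (PySem.List.enumerate houses) 0

-- ===== PORT B =====
-- s = 0; for d in range(1, i+1): if i % d == 0: s += d
def part1AltSigma (i : Int) : Int :=
  (PySem.List.pyRange 1 (i + 1) 1).foldl
    (fun s d => if PySem.Int.mod i d == 0 then s + d else s) 0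

-- for i in range(last+1): ... if 10*s >= num: return i  ... return last
def part1AltScan (num last : Int) : List Int → Int
  | [] => last
  | i :: rest => if 10 * part1AltSigma i ≥ num then i else part1AltScan num last rest

def part1_alt (data : List String) : Int :=
  match PySem.List.pyGet? data 0 with
  | none => 0
  | some s =>
    match PySem.Int.ofStr? s with
    | none => 0
    | some num =>
      let last := PySem.Int.floordiv num 10
      part1AltScan num last (PySem.List.pyRange 0 (last + 1) 1)

-- ===== PRECONDITION & SPEC =====
-- Pre_part1 excludes inputs where A raises: empty data (IndexError), data[0] not an int
-- literal (ValueError), and negative parsed values (houses is empty, so the loop variable i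
-- is unbound and A raises NameError/UnboundLocalError).
def Pre_part1 (data : List String) : Prop :=
  data ≠ [] ∧ 0 ≤ (PySem.Int.ofStr? (data.headD "")).getD (-1)
instance (data : List String) : Decidable (Pre_part1 data) := by unfold Pre_part1; infer_instance

def pvWitness_part1 : List String := ["150"]

def Spec_part1 (data : List String) (out : Int) : Prop := out = part1_alt data
instance (data : List String) (out : Int) : Decidable (Spec_part1 data out) := by unfold Spec_part1; infer_instance

-- ===== CLAIM (what is proved, stated in full; the proofs are below) =====
def Claim_equal_part1 : Prop := ∀ (data : List String), Dom_part1 data → Pre_part1 data → Spec_part1 data (part1 data)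

-- ===== LEMMAS AND PROOFS =====

-- fold of B's inner accumulation as a sum
lemma foldl_if_add (p : Int → Bool) : ∀ (L : List Int) (a : Int),
    L.foldl (fun s d => if p d then s + d else s) a
      = a + (L.map (fun d => if p d then d else 0)).sum := by
  intro L
  induction L with
  | nil => simp
  | cons x xs ih =>
    intro a
    simp only [List.foldl_cons, List.map_cons, List.sum_cons, ih]
    by_cases h : p x
    · simp [h]; ring
    · simp [h]

-- the sieve step preserves length
lemma sieve_foldl_length (c : Int) : ∀ (L : List Int) (H : List Int),
    (L.foldl (fun h i => PySem.List.pySetD h i (PySem.List.pyGetD h i 0 + c)) H).length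
      = H.length := by
  intro L
  induction L with
  | nil => intro H; simp
  | cons x xs ih =>
    intro H
    simp only [List.foldl_cons, ih, PySem.List.length_pySetD]

-- entry j after folding add-c over an index list = old entry + c * (#occurrences of j)
lemma sieve_foldl_getD (c : Int) : ∀ (L : List Int), (∀ x ∈ L, 0 ≤ x) → ∀ (H : List Int)
    (j : Nat), j < H.length →
    PySem.List.pyGetD
        (L.foldl (fun h i => PySem.List.pySetD h i (PySem.List.pyGetD h i 0 + c)) H)
        (j : Int) 0
      = PySem.List.pyGetD H (j : Int) 0 + c * (L.count ((j : Int))) := by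
  intro L
  induction L with
  | nil => intro _ H j hj; simp
  | cons x xs ih =>
    intro hL H j hj
    have hx : 0 ≤ x := hL x (by simp)
    have hxs : ∀ y ∈ xs, 0 ≤ y := fun y hy => hL y (by simp [hy])
    simp only [List.foldl_cons]
    rw [PySem.List.pySetD_of_nonneg H _ hx]
    rw [ih hxs _ j (by simpa using hj)]
    rw [PySem.List.pyGetD_natCast, PySem.List.pyGetD_natCast, PySem.List.pyGetD_of_nonneg H _ hx]
    rw [List.count_cons]
    by_cases hxj : x.toNat = j
    · have hxe : x = (j : Int) := by omega
      rw [List.getD_eq_getElem?_getD, List.getElem?_set, if_pos hxj, if_pos (by omega)]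
      have hbeq : (x == (j : Int)) = true := by simp [hxe]
      rw [hbeq, hxj]
      simp only [Option.getD_some]
      push_cast
      ring
    · rw [List.getD_eq_getElem?_getD, List.getElem?_set, if_neg hxj, ← List.getD_eq_getElem?_getD]
      have hbeq : (x == (j : Int)) = false := by
        simp only [beq_eq_false_iff_ne, ne_eq]
        omega
      rw [hbeq]
      simp

-- pyRange with positive step has no duplicates
lemma nodup_pyRange_pos {a b s : Int} (hs : 0 < s) :
    (PySem.List.pyRange a b s).Nodup := by
  rw [PySem.List.pyRange_of_pos a b hs]
  refine List.Nodup.map ?_ (List.nodup_range)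
  intro i k h
  have h2 : s * (i : Int) = s * (k : Int) := by linarith
  have h3 := mul_left_cancel₀ (by omega : s ≠ 0) h2
  exact_mod_cast h3

-- count of j in the multiples range used by the sieve
lemma count_multiples (e m : Int) (he : 1 ≤ e) (j : Nat) (hj : (j : Int) ≤ m) :
    ((PySem.List.pyRange e (m + 1) e).count ((j : Int)) : Int)
      = if e ∣ (j : Int) ∧ e ≤ (j : Int) then 1 else 0 := by
  have hnd := nodup_pyRange_pos (a := e) (b := m + 1) (by omega : (0:Int) < e)
  by_cases hmem : (j : Int) ∈ PySem.List.pyRange e (m + 1) e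
  · have hcond := (PySem.List.mem_pyRange_iff_of_pos (by omega) ((j : Int))).mp hmem
    have hdvd : e ∣ (j : Int) := by
      have := dvd_add hcond.2.2 (dvd_refl e)
      simpa using this
    rw [List.count_eq_one_of_mem hnd hmem]
    simp [hdvd, hcond.1]
  · rw [List.count_eq_zero_of_not_mem hmem]
    rw [PySem.List.mem_pyRange_iff_of_pos (by omega)] at hmem
    push Not at hmem
    by_cases hdvd : e ∣ (j : Int)
    · by_cases hle : e ≤ (j : Int)
      · exfalso
        have hd2 : e ∣ (j : Int) - e := dvd_sub hdvd (dvd_refl e)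
        have hlt : (j : Int) < m + 1 := by omega
        exact (hmem hle hlt) hd2
      · simp [hle]
    · simp [hdvd]

-- one inner sieve pass adds 10*elf exactly at the multiples of elf
lemma sieveInner_getD (num elf : Int) (m : Nat) (hm : PySem.Int.floordiv num 10 = (m : Int))
    (he : 1 ≤ elf) (H : List Int) (hlen : H.length = m + 1) (j : Nat) (hj : j ≤ m) :
    PySem.List.pyGetD (part1SieveInner num elf H) (j : Int) 0
      = PySem.List.pyGetD H (j : Int) 0
        + (if elf ∣ (j : Int) ∧ elf ≤ (j : Int) then 10 * elf else 0) := by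
  unfold part1SieveInner
  rw [hm]
  have hall : ∀ x ∈ PySem.List.pyRange elf ((m : Int) + 1) elf, 0 ≤ x := by
    intro x hx
    have := (PySem.List.mem_pyRange_iff_of_pos (by omega) x).mp hx
    omega
  rw [sieve_foldl_getD (10 * elf) _ hall H j (by omega)]
  rw [count_multiples elf m he j (by exact_mod_cast hj)]
  by_cases h : elf ∣ (j : Int) ∧ elf ≤ (j : Int) <;> simp [h]

lemma sieveInner_length (num elf : Int) (H : List Int) :
    (part1SieveInner num elf H).length = H.length := by
  unfold part1SieveInner
  exact sieve_foldl_length _ _ _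

-- folding the sieve over a list of elves: pointwise sum of contributions
lemma sieve_outer_getD (num : Int) (m : Nat) (hm : PySem.Int.floordiv num 10 = (m : Int)) :
    ∀ (E : List Int), (∀ e ∈ E, 1 ≤ e) → ∀ (H : List Int), H.length = m + 1 →
    ∀ (j : Nat), j ≤ m →
    PySem.List.pyGetD (E.foldl (fun h elf => part1SieveInner num elf h) H) (j : Int) 0
      = PySem.List.pyGetD H (j : Int) 0
        + (E.map (fun e => if e ∣ (j : Int) ∧ e ≤ (j : Int) then 10 * e else 0)).sum := by
  intro E
  induction E with
  | nil => intro _ H _ j _; simp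
  | cons e es ih =>
    intro hE H hlen j hj
    have he : 1 ≤ e := hE e (by simp)
    simp only [List.foldl_cons, List.map_cons, List.sum_cons]
    rw [ih (fun x hx => hE x (by simp [hx])) _ (by rw [sieveInner_length]; exact hlen) j hj]
    rw [sieveInner_getD num e m hm he H hlen j hj]
    ring

lemma sieve_outer_length (num : Int) : ∀ (E : List Int) (H : List Int),
    (E.foldl (fun h elf => part1SieveInner num elf h) H).length = H.length := by
  intro E
  induction E with
  | nil => intro H; rfl
  | cons e es ih => intro H; rw [List.foldl_cons, ih, sieveInner_length]

-- B's per-house divisor sum as a list sum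
lemma altSigma_eq_sum (j : Nat) :
    part1AltSigma (j : Int)
      = ((PySem.List.pyRange 1 ((j : Int) + 1) 1).map
          (fun d => if PySem.Int.mod (j : Int) d == 0 then d else 0)).sum := by
  unfold part1AltSigma
  rw [foldl_if_add]
  simp

-- the total sieve contribution at house j equals 10 * B's divisor sum
lemma contributions_eq (m j : Nat) (hj : j ≤ m) :
    ((PySem.List.pyRange 1 ((m : Int) + 1) 1).map
        (fun e => if e ∣ (j : Int) ∧ e ≤ (j : Int) then 10 * e else 0)).sum
      = 10 * part1AltSigma (j : Int) := by
  rw [altSigma_eq_sum]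
  rw [PySem.List.pyRange_one_append 1 ((j : Int) + 1) ((m : Int) + 1) (by omega) (by omega)]
  rw [List.map_append, List.sum_append]
  have hzero : ((PySem.List.pyRange ((j : Int) + 1) ((m : Int) + 1) 1).map
      (fun e => if e ∣ (j : Int) ∧ e ≤ (j : Int) then 10 * e else 0)).sum = 0 := by
    apply List.sum_eq_zero
    intro x hx
    simp only [List.mem_map] at hx
    rcases hx with ⟨e, he, rfl⟩
    rw [PySem.List.mem_pyRange_one] at he
    have : ¬ (e ∣ (j : Int) ∧ e ≤ (j : Int)) := by omega
    simp [this]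
  rw [hzero, add_zero]
  rw [← List.sum_map_mul_left]
  congr 1
  apply List.map_congr_left
  intro e he
  rw [PySem.List.mem_pyRange_one] at he
  have hdvd : (PySem.Int.mod (j : Int) e == 0) = true ↔ e ∣ (j : Int) := by
    simp [PySem.Int.mod_eq_zero_iff_dvd]
  by_cases h : e ∣ (j : Int)
  · simp [h, hdvd.mpr h, Int.lt_add_one_iff.mp he.2]
  · have : (PySem.Int.mod (j : Int) e == 0) = false := by
      rw [Bool.eq_false_iff]
      intro hc; exact h (hdvd.mp hc)
    simp [h, this]

-- the sieved houses list is exactly the map of 10 * sigma over 0..m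
lemma houses_eq (num : Int) (m : Nat) (hm : PySem.Int.floordiv num 10 = (m : Int)) :
    (PySem.List.pyRange 1 (PySem.Int.floordiv num 10 + 1) 1).foldl
        (fun h elf => part1SieveInner num elf h)
        (List.replicate (1 + PySem.Int.floordiv num 10).toNat 0)
      = (List.range (m + 1)).map (fun (j : Nat) => 10 * part1AltSigma (j : Int)) := by
  rw [hm]
  have hrep : ((1:Int) + (m:Int)).toNat = m + 1 := by omega
  apply List.ext_getElem
  · rw [sieve_outer_length, List.length_replicate, hrep, List.length_map, List.length_range]
  · intro j h1 h2
    rw [sieve_outer_length, List.length_replicate, hrep] at h1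
    have hj : j ≤ m := by omega
    have hE : ∀ e ∈ PySem.List.pyRange 1 ((m : Int) + 1) 1, 1 ≤ e := by
      intro e he; rw [PySem.List.mem_pyRange_one] at he; omega
    have hget := sieve_outer_getD num m hm _ hE
        (List.replicate ((1 + (m : Int)).toNat) 0)
        (by rw [List.length_replicate, hrep]) j hj
    rw [contributions_eq m j hj] at hget
    have hrepl : PySem.List.pyGetD (List.replicate ((1 + (m : Int)).toNat) (0:Int)) (j : Int) 0 = 0 := by
      rw [PySem.List.pyGetD_natCast, hrep]
      exact List.getD_replicate 0 (by omega)
    rw [hrepl, zero_add] at hget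
    rw [PySem.List.pyGetD_natCast] at hget
    rw [List.getD_eq_getElem?_getD,
        List.getElem?_eq_getElem (by rwa [sieve_outer_length, List.length_replicate, hrep])] at hget
    simp only [Option.getD_some] at hget
    rw [hget, List.getElem_map, List.getElem_range]

-- the two final scans agree: A's enumerate-break scan vs B's range scan
lemma scan_eq (num : Int) (m : Nat) :
    ∀ (c k : Nat) (acc : Int), k + c = m + 1 → (c = 0 → acc = (m : Int)) →
    part1Find num
        (PySem.List.enumerate ((List.range' k c).map (fun (j : Nat) => 10 * part1AltSigma (j : Int))) (k : Int))
        acc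
      = part1AltScan num (m : Int) (PySem.List.pyRange (k : Int) ((m : Int) + 1) 1) := by
  intro c
  induction c with
  | zero =>
    intro k acc hk hacc
    have : PySem.List.pyRange (k : Int) ((m : Int) + 1) 1 = [] :=
      PySem.List.pyRange_one_eq_nil (by omega)
    rw [this]
    simp [part1Find, part1AltScan, PySem.List.enumerate_nil, hacc rfl]
  | succ c ih =>
    intro k acc hk _
    rw [List.range'_succ, List.map_cons, PySem.List.enumerate_cons]
    rw [PySem.List.pyRange_one_cons (by omega : (k : Int) < (m : Int) + 1)]
    simp only [part1Find, part1AltScan]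
    by_cases h : 10 * part1AltSigma (k : Int) ≥ num
    · simp [h]
    · simp only [if_neg h]
      have := ih (k + 1) ((k : Int)) (by omega) (by intro hc; omega)
      push_cast at this ⊢
      rw [this]

-- ===== VERDICT (by name: the statement is the Claim_ definition above) =====
theorem part1_spec : Claim_equal_part1 := by
  intro data _ hpre
  unfold Spec_part1 part1 part1_alt
  unfold Pre_part1 at hpre
  match data with
  | [] => exact absurd rfl hpre.1
  | s :: rest =>
    simp only [PySem.List.pyGet?_zero_cons, List.headD_cons] at hpre ⊢
    match hs : PySem.Int.ofStr? s with
    | none => rw [hs] at hpre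
    | some num =>
      rw [hs] at hpre
      simp only [Option.getD_some] at hpre
      dsimp only
      have hnum : 0 ≤ num := hpre.2
      have h10 : (0:Int) < 10 := by omega
      have hM : 0 ≤ PySem.Int.floordiv num 10 := by
        rw [PySem.Int.floordiv_eq_ediv_of_pos h10]
        exact Int.ediv_nonneg hnum (by omega)
      have hm : PySem.Int.floordiv num 10 = (((PySem.Int.floordiv num 10).toNat : Nat) : Int) := by
        omega
      rw [houses_eq num (PySem.Int.floordiv num 10).toNat hm]
      rw [List.range_eq_range']
      have := scan_eq num (PySem.Int.floordiv num 10).toNat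
        ((PySem.Int.floordiv num 10).toNat + 1) 0 0 (by omega) (by omega)
      simp only [Nat.cast_zero] at this
      rw [this, ← hm]
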